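-- pv_equiv track=rewrite | github.com/jeffshrager/lclshfe | src/library/functions/conf_func.py | sort_combinations
-- ===== SOURCE A (Python) =====
-- import itertools
--
-- def cartesian_product(kwargs):
--     """This returns a list of dictionaries with single value keys
--     as a result of the cartesian product of the values
--
--     eg:
--     'a': [1, 2, 3]
--     'b': [4, 5, 6]
--
--     result = [{'a': 1, 'b': 4},
--               {'a': 1, 'b': 5},
--               {'a': 1, 'b': 6},"""
--     keys, values = kwargs.keys(), kwargs.values()
--     values_choices = (cartesian_product(v) if isinstance(v, dict) else v for v in values)
--     for comb in itertools.product(*values_choices):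
--         yield dict(zip(keys, comb))
--
-- def sort_combinations(override_dictionary:dict, dictionary:dict, raw_combinations:list):
--     """sort combinations"""
--     combinations = []
--     temp_list = list(cartesian_product(override_dictionary)) if override_dictionary else {
--     'settings':{'name': dictionary['settings']['name'][0]}}
--     number_of_combinations:int = len(temp_list) // len(dictionary['reps'])
--     for com in range(number_of_combinations):
--         for rep in dictionary['reps']:
--             combinations.append(raw_combinations[com+(rep*number_of_combinations)])
--     return combinations
-- ===== SOURCE B (Python) =====
-- def sort_combinations(override_dictionary: dict, dictionary: dict, raw_combinations: list):
--     """Interleave raw_combinations: one row-block per rep, flattened by transposition."""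
--     size = 1
--     for values in override_dictionary.values():
--         size *= len(values)
--     n = size // len(dictionary['reps'])
--     rows = [[raw_combinations[com + rep * n] for com in range(n)]
--             for rep in dictionary['reps']]
--     return [x for col in zip(*rows) for x in col]
-- ===== Notes on version B (the rewrite author's own statement) =====
-- stated objective: alternative
-- what changed: B replaces A's materialised cartesian product and nested com/rep append loop by a closed product of value-list lengths plus per-rep gathered rows flattened by a zip transposition; Pre_ excludes only inputs where A raises under the declared types (empty override_dictionary -> TypeError on dictionary['settings']['name'], missing 'reps' key -> KeyError, empty reps -> ZeroDivisionError, out-of-range com+rep*N index -> IndexError).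
import Mathlib
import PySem

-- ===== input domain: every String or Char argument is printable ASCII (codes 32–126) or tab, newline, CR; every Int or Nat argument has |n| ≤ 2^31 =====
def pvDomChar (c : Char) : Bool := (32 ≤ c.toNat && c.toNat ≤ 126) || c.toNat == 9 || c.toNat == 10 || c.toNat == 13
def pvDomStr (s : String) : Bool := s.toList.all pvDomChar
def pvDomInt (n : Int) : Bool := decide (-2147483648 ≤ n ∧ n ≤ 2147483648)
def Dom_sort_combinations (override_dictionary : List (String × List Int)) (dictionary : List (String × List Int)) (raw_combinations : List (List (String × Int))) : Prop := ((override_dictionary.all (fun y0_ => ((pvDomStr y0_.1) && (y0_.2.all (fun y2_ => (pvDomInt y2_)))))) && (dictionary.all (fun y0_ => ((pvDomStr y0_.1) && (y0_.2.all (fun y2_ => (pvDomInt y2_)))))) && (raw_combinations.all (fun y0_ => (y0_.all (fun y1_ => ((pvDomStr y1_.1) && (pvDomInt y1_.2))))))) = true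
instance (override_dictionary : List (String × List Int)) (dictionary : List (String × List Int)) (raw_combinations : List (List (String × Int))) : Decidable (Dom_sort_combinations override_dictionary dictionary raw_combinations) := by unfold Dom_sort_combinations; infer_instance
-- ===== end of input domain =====

-- B changes the decomposition: it computes the block size by a closed product of value-list lengths (no materialised
-- cartesian product) and builds one row of gathered elements per rep, flattening them by a zip-style transposition,
-- where A runs one nested com/rep loop appending element by element.

-- ===== PORT A =====
-- itertools.product over the dict's value lists (values are plain int lists, so the isinstance(dict) branch never fires)
def pvCartProd : List (List Int) → List (List Int)
  | [] => [[]]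
  | v :: vs => v.flatMap (fun x => (pvCartProd vs).map (fun rest => x :: rest))

def sort_combinations (override_dictionary : List (String × List Int)) (dictionary : List (String × List Int)) (raw_combinations : List (List (String × Int))) : List (List (String × Int)) :=
  if override_dictionary.isEmpty then []  -- Python's else-branch evaluates dictionary['settings']['name'] on a list value: TypeError/KeyError, excluded by Pre_
  else
    let d := PySem.Dict.ofList override_dictionary
    let temp_list := (pvCartProd d.values).map (fun comb => d.keys.zip comb)
    let reps := (PySem.Dict.ofList dictionary).getD "reps" []  -- missing key: KeyError, excluded by Pre_
    if reps.length = 0 then []  -- ZeroDivisionError, excluded by Pre_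
    else
      let n := PySem.Int.floordiv (temp_list.length : Int) (reps.length : Int)
      (PySem.List.pyRange 0 n 1).foldl (fun acc com =>
        reps.foldl (fun acc2 rep =>
          match PySem.List.pyGet? raw_combinations (com + rep * n) with
          | some x => acc2 ++ [x]
          | none => acc2) acc) []  -- none = IndexError, excluded by Pre_

-- ===== PORT B =====
-- zip(*rows) followed by flattening; the Nat argument is termination fuel (first row's length bounds the zip length)
def pvZipStarGo {α : Type} : Nat → List (List α) → List (List α)
  | 0, _ => []
  | fuel+1, rows =>
    if rows.isEmpty || rows.any List.isEmpty then []
    else (rows.flatMap (fun r => r.take 1)) :: pvZipStarGo fuel (rows.map List.tail)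

def pvZipStar {α : Type} (rows : List (List α)) : List (List α) :=
  pvZipStarGo ((rows.head?.getD []).length) rows

def sort_combinations_alt (override_dictionary : List (String × List Int)) (dictionary : List (String × List Int)) (raw_combinations : List (List (String × Int))) : List (List (String × Int)) :=
  let size := (PySem.Dict.ofList override_dictionary).values.foldl (fun s v => s * (v.length : Int)) 1
  let reps := (PySem.Dict.ofList dictionary).getD "reps" []  -- missing key: KeyError, excluded by Pre_
  if reps.length = 0 then []  -- ZeroDivisionError, excluded by Pre_
  else
    let n := PySem.Int.floordiv size (reps.length : Int)
    let rows := reps.map (fun rep =>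
      (PySem.List.pyRange 0 n 1).filterMap (fun com => PySem.List.pyGet? raw_combinations (com + rep * n)))  -- none = IndexError, excluded by Pre_
    (pvZipStar rows).flatten

-- ===== PRECONDITION & SPEC =====
-- the block size N that both programs divide by len(reps); a closed arithmetic expression, not a re-simulation
def pvN (override_dictionary : List (String × List Int)) (dictionary : List (String × List Int)) : Int :=
  PySem.Int.floordiv (((PySem.Dict.ofList override_dictionary).values.map (fun v => (v.length : Int))).prod)
    ((((PySem.Dict.ofList dictionary).getD "reps" []).length : Int))

-- Pre_ excludes exactly the inputs where the Python A raises under the declared types: an empty override_dictionary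
-- (the else-branch indexes a list value with the string 'name': TypeError/KeyError), a dictionary without key 'reps'
-- (KeyError), empty reps (ZeroDivisionError), and any com+rep*N index outside Python's valid (wraparound-inclusive) range
-- (IndexError).
def Pre_sort_combinations (override_dictionary : List (String × List Int)) (dictionary : List (String × List Int)) (raw_combinations : List (List (String × Int))) : Prop :=
  override_dictionary ≠ [] ∧
  ((PySem.Dict.ofList dictionary).get? "reps").isSome ∧
  (PySem.Dict.ofList dictionary).getD "reps" [] ≠ [] ∧
  (∀ rep ∈ (PySem.Dict.ofList dictionary).getD "reps" [],
    ∀ com ∈ PySem.List.pyRange 0 (pvN override_dictionary dictionary) 1,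
      PySem.Raise.InRange raw_combinations.length (com + rep * pvN override_dictionary dictionary))
instance (override_dictionary : List (String × List Int)) (dictionary : List (String × List Int)) (raw_combinations : List (List (String × Int))) : Decidable (Pre_sort_combinations override_dictionary dictionary raw_combinations) := by unfold Pre_sort_combinations; infer_instance

def pvWitness_sort_combinations : (List (String × List Int)) × (List (String × List Int)) × (List (List (String × Int))) :=
  ([("a", [1, 2])], [("reps", [0, 1])], [[("x", 1)], [("y", 2)]])

def Spec_sort_combinations (override_dictionary : List (String × List Int)) (dictionary : List (String × List Int)) (raw_combinations : List (List (String × Int))) (out : List (List (String × Int))) : Prop := out = sort_combinations_alt override_dictionary dictionary raw_combinations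
instance (override_dictionary : List (String × List Int)) (dictionary : List (String × List Int)) (raw_combinations : List (List (String × Int))) (out : List (List (String × Int))) : Decidable (Spec_sort_combinations override_dictionary dictionary raw_combinations out) := by unfold Spec_sort_combinations; infer_instance

-- ===== CLAIM (what is proved, stated in full; the proofs are below) =====
def Claim_equal_sort_combinations : Prop := ∀ (override_dictionary : List (String × List Int)) (dictionary : List (String × List Int)) (raw_combinations : List (List (String × Int))), Dom_sort_combinations override_dictionary dictionary raw_combinations → Pre_sort_combinations override_dictionary dictionary raw_combinations → Spec_sort_combinations override_dictionary dictionary raw_combinations (sort_combinations override_dictionary dictionary raw_combinations)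

-- ===== LEMMAS AND PROOFS =====

theorem pvCartProd_length (vs : List (List Int)) : (pvCartProd vs).length = (vs.map List.length).prod := by
  induction vs with
  | nil => simp [pvCartProd]
  | cons v vs ih => simp [pvCartProd, List.length_flatMap, ih, List.map_const']

theorem pvFoldlMul (l : List (List Int)) (a : Int) :
    l.foldl (fun s v => s * (v.length : Int)) a = a * (l.map (fun v => (v.length : Int))).prod := by
  induction l generalizing a with
  | nil => simp
  | cons v l ih => simp [List.foldl_cons, ih]; ring

theorem pvZipStarGo_maps {α β γ : Type} (reps : List β) (hne : reps ≠ []) (l : List γ) (h : β → γ → α) :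
    pvZipStarGo l.length (reps.map (fun r => l.map (h r))) = l.map (fun c => reps.map (fun r => h r c)) := by
  induction l generalizing reps with
  | nil => simp [pvZipStarGo]
  | cons c l ih =>
    obtain ⟨r0, rs, rfl⟩ : ∃ r0 rs, reps = r0 :: rs := by
      cases reps with
      | nil => exact absurd rfl hne
      | cons a b => exact ⟨a, b, rfl⟩
    have hrec := ih (r0 :: rs) (by simp)
    simp only [List.length_cons, pvZipStarGo, List.map_cons, List.map_map]
    simp only [List.isEmpty_cons, Bool.false_or, List.any_cons, List.any_map]
    simp [Function.comp_def, List.flatMap_cons, List.flatMap_map, List.take]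
    exact ⟨(List.map_eq_flatMap).symm, by simpa using hrec⟩

theorem pvGetSome {α : Type} (xs : List α) (i : Int) (d : α) (h : PySem.Raise.InRange xs.length i) :
    PySem.List.pyGet? xs i = some (PySem.List.pyGetD xs i d) := by
  have h' : -(xs.length : Int) ≤ i ∧ i < xs.length := by simpa [PySem.Raise.InRange] using h
  have hs : (PySem.List.pyGet? xs i).isSome := by
    simp only [PySem.List.pyGet?, PySem.List.pyIdx?]
    split_ifs with h1 h2 h3 <;> simp <;> omega
  obtain ⟨v, hv⟩ := Option.isSome_iff_exists.mp hs
  simp [PySem.List.pyGetD, hv]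

theorem pvZipStar_maps {α β γ : Type} (reps : List β) (hne : reps ≠ []) (l : List γ) (h : β → γ → α) :
    (pvZipStar (reps.map (fun r => l.map (h r)))).flatten = l.flatMap (fun c => reps.map (fun r => h r c)) := by
  obtain ⟨r0, rs, rfl⟩ : ∃ r0 rs, reps = r0 :: rs := by
    cases reps with
    | nil => exact absurd rfl hne
    | cons a b => exact ⟨a, b, rfl⟩
  unfold pvZipStar
  simp only [List.map_cons, List.head?_cons, Option.getD_some, List.length_map]
  rw [show (List.map (h r0) l :: List.map (fun r => List.map (h r) l) rs) = List.map (fun r => l.map (h r)) (r0 :: rs) by simp]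
  rw [pvZipStarGo_maps (r0 :: rs) (by simp) l h]
  exact List.flatMap_def.symm

theorem sort_combinations_spec : Claim_equal_sort_combinations := by
  intro od dic raw _ hPre
  obtain ⟨hod, hkey, hrne, hin⟩ := hPre
  unfold Spec_sort_combinations sort_combinations sort_combinations_alt
  have hodE : od.isEmpty = false := by simpa using hod
  have hrl : ((PySem.Dict.ofList dic).getD "reps" []).length ≠ 0 := by
    simpa [List.length_eq_zero_iff] using hrne
  simp only [hodE, Bool.false_eq_true, if_false, if_neg hrl]
  set vals := (PySem.Dict.ofList od).values with hvals
  set reps := (PySem.Dict.ofList dic).getD "reps" [] with hreps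
  have hnA : PySem.Int.floordiv (((pvCartProd vals).map (fun comb => (PySem.Dict.ofList od).keys.zip comb)).length : Int) (reps.length : Int) = pvN od dic := by
    unfold pvN
    rw [List.length_map, pvCartProd_length]
    congr 1
    rw [Nat.cast_list_prod]
    simp [List.map_map, Function.comp_def]
    rfl
  have hnB : PySem.Int.floordiv (vals.foldl (fun s v => s * (v.length : Int)) 1) (reps.length : Int) = pvN od dic := by
    unfold pvN
    rw [pvFoldlMul]
    simp
    rfl
  rw [hnA, hnB]
  set n := pvN od dic with hn
  -- A's nested loop is the flatMap of per-com rows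
  have hA : (PySem.List.pyRange 0 n 1).foldl (fun acc com =>
        reps.foldl (fun acc2 rep =>
          match PySem.List.pyGet? raw (com + rep * n) with
          | some x => acc2 ++ [x]
          | none => acc2) acc) []
      = (PySem.List.pyRange 0 n 1).flatMap (fun com => reps.map (fun rep => PySem.List.pyGetD raw (com + rep * n) [])) := by
    rw [PySem.List.foldl_congr_mem (g := fun acc com => acc ++ reps.map (fun rep => PySem.List.pyGetD raw (com + rep * n) []))]
    · simpa using PySem.List.foldl_append_eq_flatMap (fun com => reps.map (fun rep => PySem.List.pyGetD raw (com + rep * n) [])) (PySem.List.pyRange 0 n 1) []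
    · intro acc com hcom
      rw [PySem.List.foldl_congr_mem (g := fun acc2 rep => acc2 ++ [PySem.List.pyGetD raw (com + rep * n) []])]
      · exact PySem.List.foldl_append_singleton_eq_map (l := reps) (f := fun rep => PySem.List.pyGetD raw (com + rep * n) []) (acc := acc)
      · intro acc2 rep hrep
        rw [pvGetSome raw (com + rep * n) [] (hin rep hrep com hcom)]
  rw [hA]
  -- B's rows are total maps under Pre_
  have hrows : reps.map (fun rep => (PySem.List.pyRange 0 n 1).filterMap (fun com => PySem.List.pyGet? raw (com + rep * n)))
      = reps.map (fun rep => (PySem.List.pyRange 0 n 1).map (fun com => PySem.List.pyGetD raw (com + rep * n) [])) := by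
    apply List.map_congr_left
    intro rep hrep
    rw [List.filterMap_congr (g := fun com => some (PySem.List.pyGetD raw (com + rep * n) []))]
    · simp
    · intro com hcom
      exact pvGetSome raw (com + rep * n) [] (hin rep hrep com hcom)
  rw [hrows]
  exact (pvZipStar_maps reps hrne (PySem.List.pyRange 0 n 1) (fun rep com => PySem.List.pyGetD raw (com + rep * n) [])).symm
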